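-- pv_equiv track=rewrite | github.com/kms1234567/Study | Algorithm/binary_search/[PGM]징검다리.py | solution
-- ===== SOURCE A (Python) =====
-- def bs(target, stones, k):
--     cnt = 0
--     for stone in stones:
--         if cnt >= k:
--             break
--
--         if stone - target <= 0:
--             cnt += 1
--         else:
--             cnt = 0
--     if cnt >= k:
--             return False
--     return True
--
-- def solution(stones, k):
--     answer = 0
--
--     left = min(stones);right = max(stones)
--     while left <= right:
--         mid = (left + right) // 2
--
--         check = bs(mid, stones, k)
--
--         if check:
--             left = mid + 1
--         else:
--             answer = mid
--             right = mid - 1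
--
--     return answer
-- ===== SOURCE B (Python) =====
-- def solution(stones, k):
--     # answer = the smallest of the maxima of all windows of k consecutive stones
--     # (no full window at all -> nothing can block, 0)
--     return min((max(stones[i:i + k]) for i in range(len(stones) - k + 1)), default=0)
-- ===== Notes on version B (the rewrite author's own statement) =====
-- stated objective: alternative
-- what changed: replaces the binary search over the value range (re-scanning all stones with a reset counter at each probe) by a direct computation: the answer is the minimum over all k-windows of the window maximum (0 if there is no full window); Pre_ excludes k <= 0 and the empty list, where B's max over an empty window slice raises (and A raises min([]) on the empty list) while A's binary search happens to return min(stones) for k <= 0.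
-- outside the precondition, e.g. on solution([1, 2, 3], 0): A returns 1, B raises ValueError; on solution([5, 1], -3): A returns 1, B raises ValueError
import Mathlib
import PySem

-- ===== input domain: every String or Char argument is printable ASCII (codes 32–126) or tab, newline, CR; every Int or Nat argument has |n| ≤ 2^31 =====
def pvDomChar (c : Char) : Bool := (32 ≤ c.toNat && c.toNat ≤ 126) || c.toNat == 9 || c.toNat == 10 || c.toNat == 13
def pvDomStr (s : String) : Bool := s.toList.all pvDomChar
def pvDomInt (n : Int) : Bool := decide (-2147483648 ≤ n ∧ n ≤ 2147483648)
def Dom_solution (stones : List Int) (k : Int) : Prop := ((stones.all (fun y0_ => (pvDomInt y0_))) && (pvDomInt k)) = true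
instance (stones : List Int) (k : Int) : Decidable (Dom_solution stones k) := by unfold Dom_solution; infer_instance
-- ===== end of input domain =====

-- B computes the answer directly as the minimum over all k-windows of the window maximum,
-- instead of A's binary search over the value range; objective: alternative algorithm.

-- ===== PORT A =====
def bsLoop (target k : Int) : List Int → Int → Int
  | [], cnt => cnt
  | stone :: rest, cnt =>
    if cnt ≥ k then cnt
    else if stone - target ≤ 0 then bsLoop target k rest (cnt + 1)
    else bsLoop target k rest 0

def bs (target : Int) (stones : List Int) (k : Int) : Bool :=
  if bsLoop target k stones 0 ≥ k then false else true

def bsearchLoop (stones : List Int) (k answer left right : Int) : Int :=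
  if h : left ≤ right then
    let mid := PySem.Int.floordiv (left + right) 2
    if bs mid stones k then bsearchLoop stones k answer (mid + 1) right
    else bsearchLoop stones k mid left (mid - 1)
  else answer
termination_by (right + 1 - left).toNat
decreasing_by
  · have := PySem.Int.floordiv_two_mid_bounds h
    omega
  · have := PySem.Int.floordiv_two_mid_bounds h
    omega

def solution (stones : List Int) (k : Int) : Int :=
  bsearchLoop stones k 0 ((PySem.List.min? stones (fun x => x)).getD 0)
    ((PySem.List.max? stones (fun x => x)).getD 0)

-- ===== PORT B =====
-- min over i of max(stones[i:i+k]), default 0 when there is no full window;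
-- Python's max raises on an empty slice (k ≤ 0), which Pre_ excludes, so the inner
-- getD 0 default is never reached inside Pre_; the outer getD 0 is min's default=0.
def solution_alt (stones : List Int) (k : Int) : Int :=
  (PySem.List.min?
      ((PySem.List.pyRange 0 ((stones.length : Int) - k + 1) 1).map
        (fun i => (PySem.List.max? (PySem.List.slice stones (some i) (some (i + k))) (fun x => x)).getD 0))
      (fun x => x)).getD 0

-- ===== PRECONDITION & SPEC =====
-- Pre_ excludes k ≤ 0 and the empty list: there B's max over an empty window slice
-- raises ValueError (and A raises min([]) on the empty list), while A's binary search
-- happens to return min(stones) for k ≤ 0.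
def Pre_solution (stones : List Int) (k : Int) : Prop := 1 ≤ k ∧ stones ≠ []
instance (stones : List Int) (k : Int) : Decidable (Pre_solution stones k) := by unfold Pre_solution; infer_instance
def pvWitness_solution : List Int × Int := ([1, 2, 3], 2)

def Spec_solution (stones : List Int) (k : Int) (out : Int) : Prop := out = solution_alt stones k
instance (stones : List Int) (k : Int) (out : Int) : Decidable (Spec_solution stones k out) := by unfold Spec_solution; infer_instance

-- ===== CLAIM (what is proved, stated in full; the proofs are below) =====
def Claim_equal_solution : Prop := ∀ (stones : List Int) (k : Int), Dom_solution stones k → Pre_solution stones k → Spec_solution stones k (solution stones k)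

-- ===== LEMMAS AND PROOFS =====

theorem bsLoop_le (m k : Int) (l : List Int) :
    ∀ c : Int, 0 ≤ c → bsLoop m k l c ≤ c + l.length := by
  induction l with
  | nil => intro c hc; simp [bsLoop]
  | cons s rest ih =>
    intro c hc
    simp only [bsLoop, List.length_cons]
    split_ifs with h1 h2
    · push_cast; omega
    · have := ih (c + 1) (by omega); push_cast at *; omega
    · have := ih 0 (by omega); push_cast at *; omega

theorem bsearch_all_true (stones : List Int) (k : Int) :
    ∀ (a l r : Int), (∀ m, l ≤ m → m ≤ r → bs m stones k = true) →
      bsearchLoop stones k a l r = a := by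
  intro a l r
  fun_induction bsearchLoop stones k a l r with
  | case1 a l r hlr mid htrue ih =>
    intro hall
    refine ih (fun m hm1 hm2 => hall m ?_ hm2)
    have := PySem.Int.floordiv_two_mid_bounds hlr
    omega
  | case2 a l r hlr mid htrue ih =>
    intro hall
    have hb := PySem.Int.floordiv_two_mid_bounds hlr
    have := hall mid (by omega) (by omega)
    simp [this] at htrue
  | case3 a l r hlr => intro _; rfl

theorem bsearch_threshold (stones : List Int) (k : Int) :
    ∀ (a l r T : Int), l ≤ T → T ≤ r →
      (∀ m, l ≤ m → m ≤ r → (bs m stones k = false ↔ T ≤ m)) →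
      bsearchLoop stones k a l r = T := by
  intro a l r T
  fun_induction bsearchLoop stones k a l r with
  | case1 a l r hlr mid htrue ih =>
    intro h1 h2 hiff
    have hb := PySem.Int.floordiv_two_mid_bounds hlr
    have hmid : ¬ (T ≤ mid) := by
      intro hTm
      have := (hiff mid (by omega) (by omega)).mpr hTm
      simp [this] at htrue
    exact ih (by omega) h2 (fun m hm1 hm2 => hiff m (by omega) hm2)
  | case2 a l r hlr mid hfalse ih =>
    intro h1 h2 hiff
    have hb := PySem.Int.floordiv_two_mid_bounds hlr
    have hTmid : T ≤ mid := (hiff mid (by omega) (by omega)).mp (by simpa using hfalse)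
    by_cases hT : T ≤ mid - 1
    · exact ih h1 hT (fun m hm1 hm2 => hiff m hm1 (by omega))
    · have hTeq : T = mid := by omega
      have := bsearch_all_true stones k mid l (mid - 1) (fun m hm1 hm2 => by
        have := (hiff m hm1 (by omega))
        rcases Bool.eq_false_or_eq_true (bs m stones k) with hbm | hbm
        · exact hbm
        · exfalso; have := this.mp hbm; omega)
      rw [this]; omega
  | case3 a l r hlr => intro h1 h2 _; omega

def HasRun (m k : Int) (l : List Int) : Prop :=
  ∃ p mid q : List Int, l = p ++ mid ++ q ∧ (∀ x ∈ mid, x ≤ m) ∧ k ≤ (mid.length : Int)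

theorem bsLoop_spec (m k : Int) (hk : 1 ≤ k) (l : List Int) :
    ∀ c : Int, 0 ≤ c → c < k →
      (k ≤ bsLoop m k l c ↔
        (∃ p q : List Int, l = p ++ q ∧ (∀ x ∈ p, x ≤ m) ∧ k ≤ c + p.length) ∨ HasRun m k l) := by
  induction l with
  | nil =>
    intro c hc hck
    simp only [bsLoop]
    constructor
    · omega
    · rintro (⟨p, q, hpq, _, hlen⟩ | ⟨p, mid, q, hpq, _, hlen⟩)
      · have : p = [] := by
          cases p with
          | nil => rfl
          | cons a t => simp at hpq
        subst this; simp at hlen; omega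
      · have : mid = [] := by
          rcases List.append_eq_nil_iff.mp hpq.symm with ⟨h1, h2⟩
          exact (List.append_eq_nil_iff.mp h1).2
        subst this; simp at hlen; omega
  | cons s rest ih =>
    intro c hc hck
    simp only [bsLoop, if_neg (by omega : ¬ c ≥ k)]
    by_cases hs : s - m ≤ 0
    · rw [if_pos hs]
      by_cases hc1 : c + 1 < k
      · rw [ih (c + 1) (by omega) hc1]
        constructor
        · rintro (⟨p, q, hpq, hall, hlen⟩ | hr)
          · exact Or.inl ⟨s :: p, q, by simp [hpq], by
              intro x hx; rcases List.mem_cons.mp hx with h | h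
              · omega
              · exact hall x h, by simp only [List.length_cons]; push_cast at *; omega⟩
          · rcases hr with ⟨p, mid, q, hpq, hall, hlen⟩
            exact Or.inr ⟨s :: p, mid, q, by simp [hpq], hall, hlen⟩
        · rintro (⟨p, q, hpq, hall, hlen⟩ | ⟨p, mid, q, hpq, hall, hlen⟩)
          · cases p with
            | nil => simp at hlen; omega
            | cons a t =>
              simp only [List.cons_append, List.cons.injEq] at hpq
              exact Or.inl ⟨t, q, hpq.2, fun x hx => hall x (List.mem_cons_of_mem a hx),
                by simp only [List.length_cons] at hlen; push_cast at hlen ⊢; omega⟩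
          · cases p with
            | cons a t =>
              simp only [List.cons_append, List.cons.injEq] at hpq
              exact Or.inr ⟨t, mid, q, hpq.2, hall, hlen⟩
            | nil =>
              simp only [List.nil_append] at hpq
              cases mid with
              | nil => simp at hlen; omega
              | cons b t =>
                simp only [List.cons_append, List.cons.injEq] at hpq
                refine Or.inl ⟨t, q, hpq.2, fun x hx => hall x (List.mem_cons_of_mem b hx), ?_⟩
                simp at hlen ⊢; omega
      · -- c + 1 ≥ k: the run completes here
        have hres : k ≤ bsLoop m k rest (c + 1) := by
          cases rest with
          | nil => simp [bsLoop]; omega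
          | cons b t => simp only [bsLoop, if_pos (by omega : c + 1 ≥ k)]; omega
        constructor
        · intro _
          exact Or.inl ⟨[s], rest, rfl, by intro x hx; simp at hx; omega, by simp; omega⟩
        · intro _; exact hres
    · rw [if_neg hs]
      rw [ih 0 (by omega) (by omega)]
      constructor
      · rintro (⟨p, q, hpq, hall, hlen⟩ | hr)
        · exact Or.inr ⟨[s], p, q, by simp [hpq], hall, by simpa using hlen⟩
        · rcases hr with ⟨p, mid, q, hpq, hall, hlen⟩
          exact Or.inr ⟨s :: p, mid, q, by simp [hpq], hall, hlen⟩
      · rintro (⟨p, q, hpq, hall, hlen⟩ | ⟨p, mid, q, hpq, hall, hlen⟩)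
        · cases p with
          | nil => simp at hlen; omega
          | cons a t =>
            simp only [List.cons_append, List.cons.injEq] at hpq
            exfalso; have := hall a (by simp); omega
        · cases p with
          | cons a t =>
            simp only [List.cons_append, List.cons.injEq] at hpq
            exact Or.inr ⟨t, mid, q, hpq.2, hall, hlen⟩
          | nil =>
            simp only [List.nil_append] at hpq
            cases mid with
            | nil => simp at hlen; omega
            | cons b t =>
              simp only [List.cons_append, List.cons.injEq] at hpq
              exfalso; have := hall b (by simp); omega

theorem bs_false_iff_hasRun (m k : Int) (hk : 1 ≤ k) (stones : List Int) :
    bs m stones k = false ↔ HasRun m k stones := by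
  have h := bsLoop_spec m k hk stones 0 le_rfl (by omega)
  simp only [bs]
  constructor
  · intro hb
    have : k ≤ bsLoop m k stones 0 := by
      by_contra hcon
      simp [ge_iff_le, if_neg hcon] at hb
    rcases h.mp this with ⟨p, q, hpq, hall, hlen⟩ | hr
    · exact ⟨[], p, q, by simp [hpq], hall, by simpa using hlen⟩
    · exact hr
  · intro hr
    have : k ≤ bsLoop m k stones 0 := h.mpr (Or.inr hr)
    simp [ge_iff_le, if_pos this]

theorem hasRun_iff_window (m k : Int) (hk : 1 ≤ k) (stones : List Int) :
    HasRun m k stones ↔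
      ∃ i : Nat, i + k.toNat ≤ stones.length ∧
        ∀ x ∈ (stones.drop i).take k.toNat, x ≤ m := by
  constructor
  · rintro ⟨p, mid, q, hpq, hall, hlen⟩
    refine ⟨p.length, ?_, ?_⟩
    · have : stones.length = p.length + mid.length + q.length := by
        rw [hpq]; simp only [List.length_append]
      omega
    · intro x hx
      have hdrop : stones.drop p.length = mid ++ q := by
        rw [hpq]; rw [List.drop_append_of_le_length (by simp)]; simp
      rw [hdrop] at hx
      have hkm : k.toNat ≤ mid.length := by omega
      rw [List.take_append_of_le_length hkm] at hx
      exact hall x (List.mem_of_mem_take hx)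
  · rintro ⟨i, hi, hall⟩
    refine ⟨stones.take i, (stones.drop i).take k.toNat, (stones.drop i).drop k.toNat, ?_, hall, ?_⟩
    · rw [List.append_assoc, List.take_append_drop, List.take_append_drop]
    · rw [List.length_take, List.length_drop]
      omega

theorem solution_eq_alt_main (stones : List Int) (k : Int)
    (hk1 : 1 ≤ k) (hne : stones ≠ []) :
    solution stones k = solution_alt stones k := by
  obtain ⟨l0, hl0⟩ : ∃ l0, PySem.List.min? stones (fun x => x) = some l0 := by
    cases h : PySem.List.min? stones (fun x => x) with
    | none => exact absurd ((PySem.List.min?_eq_none_iff _ _).mp h) hne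
    | some v => exact ⟨v, rfl⟩
  obtain ⟨r0, hr0⟩ : ∃ r0, PySem.List.max? stones (fun x => x) = some r0 := by
    cases h : PySem.List.max? stones (fun x => x) with
    | none => exact absurd ((PySem.List.max?_eq_none_iff _ _).mp h) hne
    | some v => exact ⟨v, rfl⟩
  have hl0mem := PySem.List.min?_mem hl0
  have hr0mem := PySem.List.max?_mem hr0
  have hl0min : ∀ y ∈ stones, l0 ≤ y := PySem.List.min?_isMin hl0
  have hr0max : ∀ y ∈ stones, y ≤ r0 := PySem.List.max?_isMax hr0
  simp only [solution, hl0, hr0, Option.getD_some]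
  rw [solution_alt]
  set n : Int := (stones.length : Int) with hn
  by_cases hkn : n < k
  · -- no full window: the map range is empty, B yields the default 0; every probe of A passes
    have hrange : PySem.List.pyRange 0 (n - k + 1) 1 = [] := by
      apply List.eq_nil_iff_forall_not_mem.mpr
      intro x hx
      obtain ⟨h1, h2⟩ := PySem.List.mem_pyRange_one.mp hx
      omega
    rw [hrange]
    simp only [List.map_nil, PySem.List.min?, List.foldl_nil, Option.getD_none]
    refine bsearch_all_true stones k 0 l0 r0 (fun m _ _ => ?_)
    have hle := bsLoop_le m k stones 0 le_rfl
    simp only [bs]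
    rw [if_neg (by omega)]
  · have hkn : k ≤ n := by omega
    set f : Int → Int := fun i =>
      (PySem.List.max? (PySem.List.slice stones (some i) (some (i + k))) (fun x => x)).getD 0 with hf
    set windows := (PySem.List.pyRange 0 (n - k + 1) 1).map f with hw
    have hwne : windows ≠ [] := by
      rw [hw]
      simp only [ne_eq, List.map_eq_nil_iff]
      intro hcon
      have : ((0:Int)) ∈ PySem.List.pyRange 0 (n - k + 1) 1 :=
        PySem.List.mem_pyRange_one.mpr ⟨le_rfl, by omega⟩
      simp [hcon] at this
    obtain ⟨W, hW⟩ : ∃ W, PySem.List.min? windows (fun x => x) = some W := by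
      cases h : PySem.List.min? windows (fun x => x) with
      | none => exact absurd ((PySem.List.min?_eq_none_iff _ _).mp h) hwne
      | some v => exact ⟨v, rfl⟩
    rw [hW, Option.getD_some]
    -- each window value: f i is the max of the (nonempty) slice
    have hwin : ∀ i : Int, 0 ≤ i → i + k ≤ n →
        f i ∈ PySem.List.slice stones (some i) (some (i + k)) ∧
        (∀ x ∈ PySem.List.slice stones (some i) (some (i + k)), x ≤ f i) := by
      intro i hi hik
      have hlen : (PySem.List.slice stones (some i) (some (i + k))).length = k.toNat := by
        rw [PySem.List.slice_toNat stones hi (by omega)]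
        rw [List.length_take, List.length_drop]
        omega
      have hsne : PySem.List.slice stones (some i) (some (i + k)) ≠ [] := by
        intro hcon; rw [hcon] at hlen; simp at hlen; omega
      obtain ⟨v, hv⟩ : ∃ v, PySem.List.max? (PySem.List.slice stones (some i) (some (i + k))) (fun x => x) = some v := by
        cases h : PySem.List.max? (PySem.List.slice stones (some i) (some (i + k))) (fun x => x) with
        | none => exact absurd ((PySem.List.max?_eq_none_iff _ _).mp h) hsne
        | some v => exact ⟨v, rfl⟩
      constructor
      · rw [hf]; simp only [hv, Option.getD_some]; exact PySem.List.max?_mem hv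
      · intro x hx; rw [hf]; simp only [hv, Option.getD_some]
        exact PySem.List.max?_isMax hv x hx
    -- the threshold characterisation
    have hchar : ∀ m : Int, bs m stones k = false ↔ W ≤ m := by
      intro m
      rw [bs_false_iff_hasRun m k hk1 stones, hasRun_iff_window m k hk1 stones]
      constructor
      · rintro ⟨i, hi, hall⟩
        have hi0 : (0:Int) ≤ (i:Int) := by omega
        have hik : (i:Int) + k ≤ n := by
          have : (i:Int) + (k.toNat : Int) ≤ (stones.length : Int) := by exact_mod_cast hi
          omega
        have hslice : PySem.List.slice stones (some (i:Int)) (some ((i:Int) + k)) =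
            (stones.drop i).take k.toNat := by
          have ha : ((i:Int)).toNat = i := by omega
          have hb : (((i:Int)) + k).toNat - i = k.toNat := by omega
          rw [PySem.List.slice_toNat stones hi0 (by omega), ha, hb]
        have hmemw : f (i:Int) ∈ windows := by
          rw [hw]
          exact List.mem_map_of_mem (PySem.List.mem_pyRange_one.mpr ⟨hi0, by omega⟩)
        have hfim : f (i:Int) ≤ m := by
          obtain ⟨hmem, _⟩ := hwin (i:Int) hi0 hik
          rw [hslice] at hmem
          exact hall _ hmem
        exact le_trans (PySem.List.min?_isMin hW _ hmemw) hfim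
      · intro hWm
        obtain ⟨fi, hfi, hfieq⟩ := List.mem_map.mp (by rw [hw] at *; exact PySem.List.min?_mem hW)
        obtain ⟨hi1, hi2⟩ := PySem.List.mem_pyRange_one.mp hfi
        refine ⟨fi.toNat, by omega, ?_⟩
        have hik : fi + k ≤ n := by omega
        have hslice : PySem.List.slice stones (some fi) (some (fi + k)) =
            (stones.drop fi.toNat).take k.toNat := by
          have hb : (fi + k).toNat - fi.toNat = k.toNat := by omega
          rw [PySem.List.slice_toNat stones hi1 (by omega), hb]
        obtain ⟨_, hmax⟩ := hwin fi hi1 hik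
        rw [hslice] at hmax
        intro x hx
        exact le_trans (hmax x hx) (hfieq.le.trans hWm)
    -- W lies between min stones and max stones
    have hWmem : W ∈ stones := by
      have hWw := PySem.List.min?_mem hW
      rw [hw] at hWw
      obtain ⟨fi, hfi, hfieq⟩ := List.mem_map.mp hWw
      obtain ⟨hi1, hi2⟩ := PySem.List.mem_pyRange_one.mp hfi
      obtain ⟨hmem, _⟩ := hwin fi hi1 (by omega)
      rw [← hfieq]
      exact PySem.List.mem_of_mem_slice _ _ _ hmem
    exact bsearch_threshold stones k 0 l0 r0 W (hl0min W hWmem) (hr0max W hWmem)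
      (fun m _ _ => hchar m)

-- ===== VERDICT (by name: the statement is the Claim_ definition above) =====
theorem solution_spec : Claim_equal_solution := by
  intro stones k _ hpre
  unfold Spec_solution
  exact solution_eq_alt_main stones k hpre.1 hpre.2
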